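-- pv_equiv track=rewrite | github.com/theatina/AoC-Advent-of-Code | Day 12 Rain Risk/day12.py | move_transcription
-- ===== SOURCE A (Python) =====
-- def move_transcription(moves):
--     compass = ['E','S','W','N']
--     rotation_moves = ['R', 'L']
--     direction_moves = ['F']
--     direction_moves.extend(compass)
--     map_moves = []
--
--     moving_direction = ['E']
--     steps = [0]
--     facing_direction = ['E']
--
--     for i in moves:
--         if i[0] in compass:
--             moving_direction.append(i[0])
--             steps.append(i[1])
--             facing_direction.append(facing_direction[-1])
--         elif i[0]=="F":
--             moving_direction.append(facing_direction[-1])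
--             steps.append(i[1])
--             facing_direction.append(facing_direction[-1])
--         elif i[0] in rotation_moves:
--             if i[0]=="R":
--                 new_direction = compass[ (compass.index(facing_direction[-1])+i[1]//90)%4 ]
--             elif  i[0]=="L":
--                 new_direction = compass[ (compass.index(facing_direction[-1])-i[1]//90)%4 ]
--
--             moving_direction.append(new_direction)
--             steps.append(0)
--             facing_direction.append(new_direction)
--
--     return moving_direction,steps,facing_direction
-- ===== SOURCE B (Python) =====
-- def move_transcription(moves):
--     compass = ['E', 'S', 'W', 'N']
--     # pass 1: keep the processable moves, tracking the facing index after each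
--     k = 0
--     kept = []
--     idxs = []
--     for m, n in moves:
--         if m == 'R':
--             k += n // 90
--         elif m == 'L':
--             k -= n // 90
--         elif m != 'F' and m not in compass:
--             continue
--         kept.append((m, n))
--         idxs.append(k)
--     # pass 2: derive the three output lists from (kept, idxs)
--     moving_direction = ['E'] + [m if m in compass else compass[i % 4]
--                                 for (m, _), i in zip(kept, idxs)]
--     steps = [0] + [0 if m in ('R', 'L') else n for m, n in kept]
--     facing_direction = ['E'] + [compass[i % 4] for i in idxs]
--     return moving_direction, steps, facing_direction
-- ===== Notes on version B (the rewrite author's own statement) =====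
-- stated objective: alternative
-- what changed: A's single interleaved pass that reads facing_direction[-1] and calls compass.index each step is replaced by an index-first scan producing (kept moves, facing-index list) followed by a separate mapping pass that derives the three output lists from them.
import Mathlib
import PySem

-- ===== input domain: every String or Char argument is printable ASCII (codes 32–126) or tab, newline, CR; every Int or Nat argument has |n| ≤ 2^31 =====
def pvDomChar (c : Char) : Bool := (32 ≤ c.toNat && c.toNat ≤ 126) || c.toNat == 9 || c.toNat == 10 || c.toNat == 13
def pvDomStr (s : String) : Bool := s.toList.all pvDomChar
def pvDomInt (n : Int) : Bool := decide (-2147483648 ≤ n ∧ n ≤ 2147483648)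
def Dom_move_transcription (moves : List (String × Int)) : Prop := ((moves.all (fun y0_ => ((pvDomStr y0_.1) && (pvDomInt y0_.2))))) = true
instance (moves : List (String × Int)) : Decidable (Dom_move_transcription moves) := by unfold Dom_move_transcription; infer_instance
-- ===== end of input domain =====

-- B replaces A's single interleaved pass (reading facing_direction[-1] and compass.index each step)
-- by an index-first scan producing (kept, idxs) and a second mapping pass; objective: alternative decomposition.

-- ===== PORT A =====
def pvCompass : List String := ["E", "S", "W", "N"]

-- A's loop; the three lists are kept as reversed accumulators, so
-- 'facing_direction[-1]' is the accumulator's head and 'append' is cons.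
def pvALoop : List (String × Int) → List String → List Int → List String →
    List String × List Int × List String
  | [], md, st, fd => (md.reverse, st.reverse, fd.reverse)
  | (m, n) :: rest, md, st, fd =>
    if m ∈ pvCompass then
      pvALoop rest (m :: md) (n :: st) (fd.headD "" :: fd)
    else if m = "F" then
      pvALoop rest (fd.headD "" :: md) (n :: st) (fd.headD "" :: fd)
    else if m ∈ ["R", "L"] then
      let idx : Int := ((PySem.List.index? pvCompass (fd.headD "")).getD 0 : Nat)
      let nd :=
        if m = "R" then
          (PySem.List.pyGet? pvCompass (PySem.Int.mod (idx + PySem.Int.floordiv n 90) 4)).getD ""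
        else
          (PySem.List.pyGet? pvCompass (PySem.Int.mod (idx - PySem.Int.floordiv n 90) 4)).getD ""
      pvALoop rest (nd :: md) (0 :: st) (nd :: fd)
    else
      pvALoop rest md st fd

def move_transcription (moves : List (String × Int)) : List String × List Int × List String :=
  pvALoop moves ["E"] [0] ["E"]

-- ===== PORT B =====
-- compass[i % 4]
def pvCAt (i : Int) : String :=
  (PySem.List.pyGet? pvCompass (PySem.Int.mod i 4)).getD ""

-- pass 1 of Source B: the kept moves and the facing index after each (reversed accumulators)
def pvBScan : List (String × Int) → Int → List (String × Int) → List Int →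
    List (String × Int) × List Int
  | [], _, kept, idxs => (kept.reverse, idxs.reverse)
  | (m, n) :: rest, k, kept, idxs =>
    if m = "R" then
      let k' := k + PySem.Int.floordiv n 90
      pvBScan rest k' ((m, n) :: kept) (k' :: idxs)
    else if m = "L" then
      let k' := k - PySem.Int.floordiv n 90
      pvBScan rest k' ((m, n) :: kept) (k' :: idxs)
    else if m ≠ "F" ∧ m ∉ pvCompass then
      pvBScan rest k kept idxs
    else
      pvBScan rest k ((m, n) :: kept) (k :: idxs)

def move_transcription_alt (moves : List (String × Int)) : List String × List Int × List String :=
  let s := pvBScan moves 0 [] []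
  ("E" :: (s.1.zip s.2).map (fun p => if p.1.1 ∈ pvCompass then p.1.1 else pvCAt p.2),
   0 :: s.1.map (fun p => if p.1 = "R" ∨ p.1 = "L" then (0 : Int) else p.2),
   "E" :: s.2.map pvCAt)

-- ===== PRECONDITION & SPEC =====
def Spec_move_transcription (moves : List (String × Int)) (out : List String × List Int × List String) : Prop := out = move_transcription_alt moves
instance (moves : List (String × Int)) (out : List String × List Int × List String) : Decidable (Spec_move_transcription moves out) := by unfold Spec_move_transcription; infer_instance

-- ===== CLAIM (what is proved, stated in full; the proofs are below) =====
def Claim_equal_move_transcription : Prop := ∀ (moves : List (String × Int)), Dom_move_transcription moves → Spec_move_transcription moves (move_transcription moves)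

-- ===== LEMMAS AND PROOFS =====

theorem pvmod4_cases (k : Int) :
    PySem.Int.mod k 4 = 0 ∨ PySem.Int.mod k 4 = 1 ∨ PySem.Int.mod k 4 = 2 ∨ PySem.Int.mod k 4 = 3 := by
  rw [PySem.Int.mod_eq_emod_of_pos (by norm_num)]
  omega

theorem pvIndex_cAt (k : Int) :
    (((PySem.List.index? pvCompass (pvCAt k)).getD 0 : Nat) : Int) = PySem.Int.mod k 4 := by
  rcases pvmod4_cases k with h | h | h | h <;> simp only [pvCAt, h] <;> decide

theorem pvmod_add (k d : Int) :
    PySem.Int.mod (PySem.Int.mod k 4 + d) 4 = PySem.Int.mod (k + d) 4 := by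
  rw [PySem.Int.mod_eq_emod_of_pos (by norm_num), PySem.Int.mod_eq_emod_of_pos (by norm_num),
      PySem.Int.mod_eq_emod_of_pos (by norm_num)]
  omega

theorem pvmod_sub (k d : Int) :
    PySem.Int.mod (PySem.Int.mod k 4 - d) 4 = PySem.Int.mod (k - d) 4 := by
  rw [PySem.Int.mod_eq_emod_of_pos (by norm_num), PySem.Int.mod_eq_emod_of_pos (by norm_num),
      PySem.Int.mod_eq_emod_of_pos (by norm_num)]
  omega

-- accumulator lemma for B's scan
theorem pvBScan_acc (moves : List (String × Int)) :
    ∀ (k : Int) (kept : List (String × Int)) (idxs : List Int),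
    pvBScan moves k kept idxs =
      (kept.reverse ++ (pvBScan moves k [] []).1, idxs.reverse ++ (pvBScan moves k [] []).2) := by
  induction moves with
  | nil => intro k kept idxs; simp [pvBScan]
  | cons mn rest ih =>
    intro k kept idxs
    obtain ⟨m, n⟩ := mn
    simp only [pvBScan]
    split_ifs with h1 h2 h3
    · rw [ih, ih _ [(m, n)] [_]]; simp
    · rw [ih, ih _ [(m, n)] [_]]; simp
    · rw [ih, ih]
    · rw [ih, ih _ [(m, n)] [_]]; simp

def pvMovF (p : (String × Int) × Int) : String :=
  if p.1.1 ∈ pvCompass then p.1.1 else pvCAt p.2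

def pvStepF (p : String × Int) : Int :=
  if p.1 = "R" ∨ p.1 = "L" then (0 : Int) else p.2

theorem pvMain (moves : List (String × Int)) :
    ∀ (k : Int) (md : List String) (st : List Int) (fdt : List String),
    pvALoop moves md st (pvCAt k :: fdt) =
      (md.reverse ++ (((pvBScan moves k [] []).1.zip (pvBScan moves k [] []).2).map pvMovF),
       st.reverse ++ (pvBScan moves k [] []).1.map pvStepF,
       (pvCAt k :: fdt).reverse ++ (pvBScan moves k [] []).2.map pvCAt) := by
  induction moves with
  | nil => intro k md st fdt; simp [pvALoop, pvBScan]
  | cons mn rest ih =>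
    intro k md st fdt
    obtain ⟨m, n⟩ := mn
    by_cases hc : m ∈ pvCompass
    · -- compass move: kept, facing index unchanged
      rcases (by simpa [pvCompass] using hc : m = "E" ∨ m = "S" ∨ m = "W" ∨ m = "N") with hm|hm|hm|hm <;>
      · subst hm
        simp only [pvALoop, pvBScan, List.headD_cons, String.reduceEq, eq_true hc,
          if_true, if_false]
        rw [ih k _ _ _, pvBScan_acc rest k [_] [k]]
        simp [pvMovF, pvStepF, pvCompass]
    · by_cases hF : m = "F"
      · subst hF
        simp only [pvALoop, pvBScan, List.headD_cons, String.reduceEq,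
          eq_false (by decide : ¬ (("F":String) ∈ pvCompass)),
          if_true, if_false]
        rw [ih k _ _ _, pvBScan_acc rest k [_] [k]]
        simp [pvMovF, pvStepF, pvCompass]
      · by_cases hRL : m ∈ (["R", "L"] : List String)
        · rcases (by simpa using hRL : m = "R" ∨ m = "L") with hm | hm
          · -- "R"
            subst hm
            have hnd :
                (PySem.List.pyGet? pvCompass
                  (PySem.Int.mod ((((PySem.List.index? pvCompass (pvCAt k)).getD 0 : Nat) : Int)
                    + PySem.Int.floordiv n 90) 4)).getD "" =
                pvCAt (k + PySem.Int.floordiv n 90) := by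
              rw [pvIndex_cAt, pvmod_add]; rfl
            simp only [pvALoop, pvBScan, List.headD_cons, String.reduceEq,
              eq_false (by decide : ¬ (("R":String) ∈ pvCompass)),
              eq_true (by decide : ("R":String) ∈ (["R","L"]:List String)),
              if_true, if_false]
            rw [hnd]
            rw [ih (k + PySem.Int.floordiv n 90) _ _ _,
                pvBScan_acc rest _ [_] [k + PySem.Int.floordiv n 90]]
            simp [pvMovF, pvStepF, pvCompass]
          · -- "L"
            subst hm
            have hnd :
                (PySem.List.pyGet? pvCompass
                  (PySem.Int.mod ((((PySem.List.index? pvCompass (pvCAt k)).getD 0 : Nat) : Int)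
                    - PySem.Int.floordiv n 90) 4)).getD "" =
                pvCAt (k - PySem.Int.floordiv n 90) := by
              rw [pvIndex_cAt, pvmod_sub]; rfl
            simp only [pvALoop, pvBScan, List.headD_cons, String.reduceEq,
              eq_false (by decide : ¬ (("L":String) ∈ pvCompass)),
              eq_true (by decide : ("L":String) ∈ (["R","L"]:List String)),
              if_true, if_false]
            rw [hnd]
            rw [ih (k - PySem.Int.floordiv n 90) _ _ _,
                pvBScan_acc rest _ [_] [k - PySem.Int.floordiv n 90]]
            simp [pvMovF, pvStepF, pvCompass]
        · -- unrecognised move: skipped by both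
          have hR : ¬ m = "R" := fun h => hRL (by simp [h])
          have hL : ¬ m = "L" := fun h => hRL (by simp [h])
          simp only [pvALoop, pvBScan, List.headD_cons, ne_eq, eq_false hc, eq_false hF,
            eq_false hRL, eq_false hR, eq_false hL, not_false_eq_true, and_self,
            if_true, if_false]
          exact ih k md st fdt

-- ===== VERDICT (by name: the statement is the Claim_ definition above) =====
theorem move_transcription_spec : Claim_equal_move_transcription := by
  intro moves _
  show move_transcription moves = move_transcription_alt moves
  have h0 : (["E"] : List String) = [pvCAt 0] := by decide
  rw [move_transcription, h0]
  rw [pvMain moves 0 [pvCAt 0] [0] []]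
  simp [move_transcription_alt, pvMovF, pvStepF, show pvCAt 0 = "E" from by decide]
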